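-- pv_equiv track=rewrite | github.com/mattv8/ragtime | ragtime/userspace/sqlite_import.py | _split_identifier_parts
-- ===== SOURCE A (Python) =====
-- def _strip_identifier_quotes(identifier: str) -> str:
--     identifier = identifier.strip()
--     if identifier.startswith('"') and identifier.endswith('"'):
--         return identifier[1:-1].replace('""', '"')
--     if identifier.startswith("`") and identifier.endswith("`"):
--         return identifier[1:-1].replace("``", "`")
--     return identifier
--
-- def _split_identifier_parts(identifier: str) -> list[str]:
--     parts: list[str] = []
--     current: list[str] = []
--     in_double_quote = False
--     index = 0
--     while index < len(identifier):
--         char = identifier[index]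
--         if char == '"':
--             current.append(char)
--             if (
--                 in_double_quote
--                 and index + 1 < len(identifier)
--                 and identifier[index + 1] == '"'
--             ):
--                 current.append(identifier[index + 1])
--                 index += 2
--                 continue
--             in_double_quote = not in_double_quote
--         elif char == "." and not in_double_quote:
--             parts.append("".join(current).strip())
--             current = []
--         else:
--             current.append(char)
--         index += 1
--     if current:
--         parts.append("".join(current).strip())
--     return [_strip_identifier_quotes(part) for part in parts if part.strip()]
-- ===== SOURCE B (Python) =====
-- # Tokenizer rewrite: instead of a char-by-char state machine with an in_double_quote
-- # flag, scan tokens: a dedicated helper consumes a whole double-quoted segment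
-- # (doubled "" stays inside, an unterminated quote runs to the end), an unquoted dot flushes
-- # the current buffer, anything else is literal text.
--
-- def _strip_identifier_quotes(identifier: str) -> str:
--     identifier = identifier.strip()
--     if identifier.startswith('"') and identifier.endswith('"'):
--         return identifier[1:-1].replace('""', '"')
--     if identifier.startswith("`") and identifier.endswith("`"):
--         return identifier[1:-1].replace("``", "`")
--     return identifier
--
-- def _consume_quoted(identifier: str, i: int) -> int:
--     # identifier[i] == '"'; return the index just past the quoted segment
--     # (len(identifier) if the segment is unterminated).
--     j = i + 1
--     while j < len(identifier):
--         if identifier[j] == '"':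
--             if j + 1 < len(identifier) and identifier[j + 1] == '"':
--                 j += 2
--             else:
--                 return j + 1
--         else:
--             j += 1
--     return j
--
-- def _split_identifier_parts(identifier: str) -> list[str]:
--     parts: list[str] = []
--     current: list[str] = []
--     i = 0
--     while i < len(identifier):
--         char = identifier[i]
--         if char == '"':
--             j = _consume_quoted(identifier, i)
--             current.append(identifier[i:j])
--             i = j
--         elif char == ".":
--             parts.append("".join(current))
--             current = []
--             i += 1
--         else:
--             current.append(char)
--             i += 1
--     parts.append("".join(current))
--     return [_strip_identifier_quotes(part) for part in parts if part.strip()]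
-- ===== Notes on version B (the rewrite author's own statement) =====
-- stated objective: alternative
-- what changed: Replaced the char-by-char state machine with an in_double_quote boolean by a tokenizer: a dedicated helper consumes each complete double-quoted segment (doubled quotes kept, an unterminated quote runs to the end) in one step, an unquoted dot flushes the buffer; no quote flag, no per-part stripping, unconditional final flush.
import Mathlib
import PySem

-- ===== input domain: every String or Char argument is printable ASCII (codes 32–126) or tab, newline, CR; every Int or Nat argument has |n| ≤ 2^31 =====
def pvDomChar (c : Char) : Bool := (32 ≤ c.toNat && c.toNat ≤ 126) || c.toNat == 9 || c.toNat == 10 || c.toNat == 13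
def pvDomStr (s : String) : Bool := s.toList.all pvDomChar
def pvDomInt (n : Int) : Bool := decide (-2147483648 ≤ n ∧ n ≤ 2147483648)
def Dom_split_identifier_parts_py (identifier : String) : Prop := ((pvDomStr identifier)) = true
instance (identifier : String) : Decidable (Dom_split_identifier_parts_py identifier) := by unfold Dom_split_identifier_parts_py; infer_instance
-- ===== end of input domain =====

-- B replaces A's char-by-char quote-flag state machine by a tokenizer with a dedicated
-- quoted-segment consumer (alternative decomposition; return value only, no mutation).

-- ===== PORT A =====
-- shared helper _strip_identifier_quotes (used by both ports' final comprehension)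
def stripIdentifierQuotes (identifier : String) : String :=
  let s := PySem.Str.strip identifier
  if PySem.Str.startswith s "\"" && PySem.Str.endswith s "\"" then
    PySem.Str.replace (PySem.Str.slice s (some 1) (some (-1))) "\"\"" "\""
  else if PySem.Str.startswith s "`" && PySem.Str.endswith s "`" then
    PySem.Str.replace (PySem.Str.slice s (some 1) (some (-1))) "``" "`"
  else s

-- A's while loop; the running index becomes the suffix of the char list ("".join over
-- a list of single chars = String.ofList of that char list, exact).
def loopA : List Char → List String → List Char → Bool → List String
  | [], parts, current, _ =>
    if current ≠ [] then parts ++ [String.ofList current] else parts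
  | c :: rest, parts, current, inq =>
    if c = '"' then
      let current := current ++ [c]
      match h : rest with
      | c2 :: rest2 =>
        if inq && c2 = '"' then loopA rest2 parts (current ++ [c2]) inq
        else loopA rest parts current (!inq)
      | [] => loopA [] parts current (!inq)
    else if c = '.' && !inq then
      loopA rest (parts ++ [PySem.Str.strip (String.ofList current)]) [] inq
    else
      loopA rest parts (current ++ [c]) inq
termination_by cs => cs.length
decreasing_by all_goals simp_all <;> omega

def split_identifier_parts_py (identifier : String) : List String :=
  ((loopA identifier.toList [] [] false).filter
      (fun part => !(PySem.Str.strip part == ""))).map stripIdentifierQuotes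

-- ===== PORT B =====
-- _consume_quoted: the index-pair (i, j) becomes (consumed segment after the opening
-- quote, remaining suffix); identifier[i:j] is '"' :: segment.
def consumeQ : List Char → List Char × List Char
  | [] => ([], [])
  | '"' :: '"' :: rest => let (seg, r) := consumeQ rest; ('"' :: '"' :: seg, r)
  | '"' :: rest => (['"'], rest)
  | c :: rest => let (seg, r) := consumeQ rest; (c :: seg, r)

theorem consumeQ_len : ∀ cs : List Char, (consumeQ cs).2.length ≤ cs.length := by
  intro cs
  induction cs using consumeQ.induct <;> simp_all [consumeQ] <;> omega

-- B's while loop; current is the list of appended pieces, flattened ("".join).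
def loopB : List Char → List (List Char) → List Char → List (List Char)
  | [], parts, current => parts ++ [current]
  | c :: rest, parts, current =>
    if c = '"' then
      loopB (consumeQ rest).2 parts (current ++ '"' :: (consumeQ rest).1)
    else if c = '.' then
      loopB rest (parts ++ [current]) []
    else
      loopB rest parts (current ++ [c])
termination_by cs => cs.length
decreasing_by
  · have := consumeQ_len rest; simp; omega
  · simp
  · simp

def split_identifier_parts_py_alt (identifier : String) : List String :=
  (((loopB identifier.toList [] []).map String.ofList).filter
      (fun part => !(PySem.Str.strip part == ""))).map stripIdentifierQuotes

-- ===== PRECONDITION & SPEC =====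
def Spec_split_identifier_parts_py (identifier : String) (out : List String) : Prop := out = split_identifier_parts_py_alt identifier
instance (identifier : String) (out : List String) : Decidable (Spec_split_identifier_parts_py identifier out) := by unfold Spec_split_identifier_parts_py; infer_instance

-- ===== CLAIM (what is proved, stated in full; the proofs are below) =====
def Claim_equal_split_identifier_parts_py : Prop := ∀ (identifier : String), Dom_split_identifier_parts_py identifier → Spec_split_identifier_parts_py identifier (split_identifier_parts_py identifier)

-- ===== LEMMAS AND PROOFS =====

-- the shared tail of both functions: filter on part.strip(), map the quote stripper
def finalizeParts (ps : List String) : List String :=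
  (ps.filter (fun part => !(PySem.Str.strip part == ""))).map stripIdentifierQuotes

theorem finalize_append (x y : List String) :
    finalizeParts (x ++ y) = finalizeParts x ++ finalizeParts y := by
  simp [finalizeParts]

theorem dropWhile_isspace_idem (l : List Char) :
    (l.dropWhile PySem.Chars.isspace).dropWhile PySem.Chars.isspace
      = l.dropWhile PySem.Chars.isspace := by
  induction l with
  | nil => rfl
  | cons c t ih =>
    by_cases h : PySem.Chars.isspace c
    · simpa [List.dropWhile_cons, h] using ih
    · simp [h]

theorem head_dropWhile_not_isspace (l : List Char) (c : Char) (t : List Char)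
    (h : l.dropWhile PySem.Chars.isspace = c :: t) : PySem.Chars.isspace c = false := by
  induction l with
  | nil => simp at h
  | cons a r ih =>
    by_cases ha : PySem.Chars.isspace a
    · exact ih (by simpa [ha] using h)
    · simp [List.dropWhile_cons, ha] at h
      simp [← h.1, ha]

theorem strip_strip_chars (l : List Char) :
    PySem.Chars.strip (PySem.Chars.strip l) = PySem.Chars.strip l := by
  have lrl : PySem.Chars.lstrip (PySem.Chars.rstrip (PySem.Chars.lstrip l))
      = PySem.Chars.rstrip (PySem.Chars.lstrip l) := by
    unfold PySem.Chars.lstrip PySem.Chars.rstrip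
    cases hx : (List.dropWhile PySem.Chars.isspace
        (List.dropWhile PySem.Chars.isspace l).reverse).reverse with
    | nil => simp [hx]
    | cons c t =>
      -- c :: t is a prefix of lstrip l, so c heads lstrip l and is not a space
      have hsuf : List.dropWhile PySem.Chars.isspace
          (List.dropWhile PySem.Chars.isspace l).reverse
            <:+ (List.dropWhile PySem.Chars.isspace l).reverse :=
        List.dropWhile_suffix _
      have hpre : (c :: t) <+: List.dropWhile PySem.Chars.isspace l := by
        rw [← hx]
        obtain ⟨r', hr'⟩ := hsuf
        exact ⟨r'.reverse, by rw [← List.reverse_append, hr', List.reverse_reverse]⟩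
      obtain ⟨r, hr⟩ := hpre
      have hc : PySem.Chars.isspace c = false :=
        head_dropWhile_not_isspace l c (t ++ r) (by simpa using hr.symm)
      simp [hx, hc]
  have rr : ∀ x : List Char, PySem.Chars.rstrip (PySem.Chars.rstrip x)
      = PySem.Chars.rstrip x := by
    intro x
    unfold PySem.Chars.rstrip
    simp [dropWhile_isspace_idem]
  calc PySem.Chars.strip (PySem.Chars.strip l)
      = PySem.Chars.rstrip (PySem.Chars.lstrip (PySem.Chars.rstrip (PySem.Chars.lstrip l))) := rfl
    _ = PySem.Chars.rstrip (PySem.Chars.rstrip (PySem.Chars.lstrip l)) := by rw [lrl]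
    _ = PySem.Chars.rstrip (PySem.Chars.lstrip l) := rr _
    _ = PySem.Chars.strip l := rfl

theorem strip_strip_str (s : String) :
    PySem.Str.strip (PySem.Str.strip s) = PySem.Str.strip s := by
  have h : (PySem.Str.strip (PySem.Str.strip s)).toList = (PySem.Str.strip s).toList := by
    simp [PySem.Str.toList_strip, strip_strip_chars]
  exact String.toList_inj.mp h

theorem sq_strip (s : String) :
    stripIdentifierQuotes (PySem.Str.strip s) = stripIdentifierQuotes s := by
  unfold stripIdentifierQuotes
  rw [strip_strip_str]

theorem finalize_strip_single (s : String) :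
    finalizeParts [PySem.Str.strip s] = finalizeParts [s] := by
  unfold finalizeParts
  simp only [List.filter_cons, List.filter_nil, strip_strip_str]
  by_cases h : PySem.Str.strip s == "" <;> simp [h, sq_strip]

theorem finalize_empty_single : finalizeParts [""] = [] := by
  decide

-- step equations for loopA (its recursion is well-founded, so `rfl` does not unfold it)
theorem loopA_nil (parts : List String) (cur : List Char) (inq : Bool) :
    loopA [] parts cur inq = if cur ≠ [] then parts ++ [String.ofList cur] else parts := by
  rw [loopA]

theorem loopA_quote_false (rest : List Char) (parts : List String) (cur : List Char) :
    loopA ('"' :: rest) parts cur false = loopA rest parts (cur ++ ['"']) true := by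
  cases rest with
  | nil => conv_lhs => rw [loopA]
           simp [loopA_nil]
  | cons c2 rest2 => conv_lhs => rw [loopA]
                     simp

theorem loopA_dot_false (rest : List Char) (parts : List String) (cur : List Char) :
    loopA ('.' :: rest) parts cur false
      = loopA rest (parts ++ [PySem.Str.strip (String.ofList cur)]) [] false := by
  rw [loopA]; simp

theorem loopA_other_false (c : Char) (rest : List Char) (parts : List String)
    (cur : List Char) (hq : c ≠ '"') (hd : c ≠ '.') :
    loopA (c :: rest) parts cur false = loopA rest parts (cur ++ [c]) false := by
  rw [loopA]; simp [hq, hd]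

theorem loopA_other_true (c : Char) (rest : List Char) (parts : List String)
    (cur : List Char) (hq : c ≠ '"') :
    loopA (c :: rest) parts cur true = loopA rest parts (cur ++ [c]) true := by
  rw [loopA]; simp [hq]

theorem loopA_pair_true (rest2 : List Char) (parts : List String) (cur : List Char) :
    loopA ('"' :: '"' :: rest2) parts cur true
      = loopA rest2 parts (cur ++ ['"', '"']) true := by
  rw [loopA]; simp

theorem loopA_close_true (c2 : Char) (rest2 : List Char) (parts : List String)
    (cur : List Char) (hc2 : c2 ≠ '"') :
    loopA ('"' :: c2 :: rest2) parts cur true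
      = loopA (c2 :: rest2) parts (cur ++ ['"']) false := by
  rw [loopA]; simp [hc2]

theorem loopA_close_end_true (parts : List String) (cur : List Char) :
    loopA ['"'] parts cur true = loopA [] parts (cur ++ ['"']) false := by
  conv_lhs => rw [loopA]
  simp [loopA_nil]

-- step equation for consumeQ on a generic non-quote head
theorem consumeQ_cons_ne (c : Char) (rest : List Char) (hq : c ≠ '"') :
    consumeQ (c :: rest) = (c :: (consumeQ rest).1, (consumeQ rest).2) := by
  rw [consumeQ.eq_def]
  simp [hq]

theorem consumeQ_quote_ne (c2 : Char) (rest2 : List Char) (hc2 : c2 ≠ '"') :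
    consumeQ ('"' :: c2 :: rest2) = (['"'], c2 :: rest2) := by
  rw [consumeQ.eq_def]
  simp [hc2]

-- the quote lemma: from an opening quote on, A's in_double_quote run consumes exactly
-- what consumeQ consumes
theorem loopA_quoted : ∀ (cs : List Char) (parts : List String) (cur : List Char),
    loopA cs parts cur true
      = loopA (consumeQ cs).2 parts (cur ++ (consumeQ cs).1) false := by
  intro cs
  induction cs using consumeQ.induct with
  | case1 => intro parts cur; simp [consumeQ, loopA_nil]
  | case2 rest seg r heq ih =>
    intro parts cur
    rw [loopA_pair_true, ih]
    simp [consumeQ, heq]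
  | case3 rest h =>
    intro parts cur
    cases rest with
    | nil => rw [loopA_close_end_true]; simp [consumeQ]
    | cons c2 rest2 =>
      have hc2 : c2 ≠ '"' := fun he => h rest2 (by rw [he])
      rw [loopA_close_true c2 rest2 parts cur hc2, consumeQ_quote_ne c2 rest2 hc2]
  | case4 c rest h1 hq seg r heq ih =>
    intro parts cur
    have hcq : c ≠ '"' := fun he => hq he
    rw [loopA_other_true c rest parts cur hcq, ih, consumeQ_cons_ne c rest hcq]
    simp

theorem main_loop : ∀ (n : Nat) (cs : List Char), cs.length ≤ n →
    ∀ (pa : List String) (pb : List (List Char)) (cur : List Char),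
      finalizeParts pa = finalizeParts (pb.map String.ofList) →
      finalizeParts (loopA cs pa cur false)
        = finalizeParts ((loopB cs pb cur).map String.ofList) := by
  intro n
  induction n with
  | zero =>
    intro cs hlen pa pb cur hfp
    have hnil : cs = [] := List.eq_nil_of_length_eq_zero (Nat.le_zero.mp hlen)
    subst hnil
    rw [loopA_nil, loopB]
    by_cases hc : cur = []
    · subst hc
      simp [finalize_append, hfp, finalize_empty_single]
    · simp [hc, finalize_append, hfp]
  | succ m ih =>
    intro cs hlen pa pb cur hfp
    match cs with
    | [] =>
      rw [loopA_nil, loopB]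
      by_cases hc : cur = []
      · subst hc
        simp [finalize_append, hfp, finalize_empty_single]
      · simp [hc, finalize_append, hfp]
    | c :: rest =>
      simp only [List.length_cons, Nat.add_le_add_iff_right] at hlen
      by_cases hq : c = '"'
      · subst hq
        rw [loopA_quote_false, loopA_quoted]
        have hB : loopB ('"' :: rest) pb cur
            = loopB (consumeQ rest).2 pb (cur ++ '"' :: (consumeQ rest).1) := by
          rw [loopB]; simp
        rw [hB]
        have hlen' : (consumeQ rest).2.length ≤ m :=
          le_trans (consumeQ_len rest) hlen
        have := ih (consumeQ rest).2 hlen' pa pb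
          ((cur ++ ['"']) ++ (consumeQ rest).1) hfp
        simpa using this
      · by_cases hd : c = '.'
        · subst hd
          rw [loopA_dot_false]
          have hB : loopB ('.' :: rest) pb cur = loopB rest (pb ++ [cur]) [] := by
            rw [loopB]; simp [hq]
          rw [hB]
          apply ih rest hlen
          simp only [List.map_append, List.map_cons, List.map_nil, finalize_append, hfp]
          rw [finalize_strip_single]
        · rw [loopA_other_false c rest pa cur hq hd]
          have hB : loopB (c :: rest) pb cur = loopB rest pb (cur ++ [c]) := by
            rw [loopB]; simp [hq, hd]
          rw [hB]
          exact ih rest hlen pa pb (cur ++ [c]) hfp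

-- ===== VERDICT (by name: the statement is the Claim_ definition above) =====
theorem split_identifier_parts_py_spec : Claim_equal_split_identifier_parts_py := by
  unfold Claim_equal_split_identifier_parts_py
  intro identifier _
  unfold Spec_split_identifier_parts_py
  show finalizeParts (loopA identifier.toList [] [] false)
      = finalizeParts ((loopB identifier.toList [] []).map String.ofList)
  exact main_loop identifier.toList.length identifier.toList le_rfl [] [] [] rfl
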